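-- pv_equiv track=rewrite | github.com/ElshadaiK/Competitive-Programming | joysticks.py | joysticker
-- ===== SOURCE A (Python) =====
-- def joysticker(a, b):
--     count = 0
--     while(a > 0 and b > 0):
--         if(a == 1 and b==1):
--             break
--         if(a>b):
--             b += 1
--             a -= 2
--         else:
--             a += 1
--             b -= 2
--         count += 1
--     return count
-- ===== SOURCE B (Python) =====
-- def joysticker(a, b):
--     # Closed form: each step loses one unit of total charge; the game ends
--     # with total charge 3 when a == b (mod 3), else 2.
--     if a <= 0 or b <= 0 or (a == 1 and b == 1):
--         return 0
--     return a + b - 3 if a % 3 == b % 3 else a + b - 2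
-- ===== Notes on version B (the rewrite author's own statement) =====
-- stated objective: faster
-- what changed: Replaced the unit-step simulation loop with an O(1) closed form: zero when either stick starts dead or both start at one unit, else a+b-3 when the charges are congruent mod 3 and a+b-2 otherwise.
import Mathlib
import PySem

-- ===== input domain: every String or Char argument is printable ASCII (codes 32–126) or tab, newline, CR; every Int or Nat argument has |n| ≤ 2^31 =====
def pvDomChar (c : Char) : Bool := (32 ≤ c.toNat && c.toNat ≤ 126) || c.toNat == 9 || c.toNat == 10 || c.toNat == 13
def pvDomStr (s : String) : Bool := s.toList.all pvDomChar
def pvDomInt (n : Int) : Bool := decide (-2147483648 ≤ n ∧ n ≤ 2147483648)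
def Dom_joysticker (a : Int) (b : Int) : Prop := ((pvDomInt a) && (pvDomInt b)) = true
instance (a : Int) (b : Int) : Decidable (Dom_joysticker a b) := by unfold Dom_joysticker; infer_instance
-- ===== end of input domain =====

-- B replaces A's unit-step simulation loop by an O(1) closed form (objective: faster).

-- ===== PORT A =====
-- literal transliteration of A's while-loop; terminates because a+b drops by 1 each step
def joystickerLoop (a : Int) (b : Int) (count : Int) : Int :=
  if a > 0 ∧ b > 0 then
    if a = 1 ∧ b = 1 then count
    else if a > b then joystickerLoop (a - 2) (b + 1) (count + 1)
    else joystickerLoop (a + 1) (b - 2) (count + 1)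
  else count
termination_by (a + b).toNat
decreasing_by all_goals omega

def joysticker (a : Int) (b : Int) : Int := joystickerLoop a b 0

-- ===== PORT B =====
def joysticker_alt (a : Int) (b : Int) : Int :=
  if a ≤ 0 ∨ b ≤ 0 ∨ (a = 1 ∧ b = 1) then 0
  else if PySem.Int.mod a 3 = PySem.Int.mod b 3 then a + b - 3 else a + b - 2

-- ===== PRECONDITION & SPEC =====
def Spec_joysticker (a : Int) (b : Int) (out : Int) : Prop := out = joysticker_alt a b
instance (a : Int) (b : Int) (out : Int) : Decidable (Spec_joysticker a b out) := by unfold Spec_joysticker; infer_instance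

-- ===== CLAIM (what is proved, stated in full; the proofs are below) =====
def Claim_equal_joysticker : Prop := ∀ (a : Int) (b : Int), Dom_joysticker a b → Spec_joysticker a b (joysticker a b)

-- ===== LEMMAS AND PROOFS =====

theorem pvmod3 (x : Int) : PySem.Int.mod x 3 = x % 3 := by
  exact PySem.Int.mod_eq_emod_of_pos (by norm_num)

-- loop invariant: the loop returns count plus B's closed form
theorem joystickerLoop_eq (a b count : Int) :
    joystickerLoop a b count = count + joysticker_alt a b := by
  fun_induction joystickerLoop a b count with
  | case1 a b count h h11 =>
      simp only [joysticker_alt]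
      rw [if_pos (by omega)]
      omega
  | case2 a b count h h11 hab ih =>
      rw [ih]
      simp only [joysticker_alt, pvmod3] at *
      split_ifs with h1 h2 h3 h4 <;> omega
  | case3 a b count h h11 hab ih =>
      rw [ih]
      simp only [joysticker_alt, pvmod3] at *
      split_ifs with h1 h2 h3 h4 <;> omega
  | case4 a b count h =>
      simp only [joysticker_alt]
      rw [if_pos (by omega)]
      omega

-- ===== VERDICT (by name: the statement is the Claim_ definition above) =====
theorem joysticker_spec : Claim_equal_joysticker := by
  intro a b _
  unfold Spec_joysticker joysticker
  rw [joystickerLoop_eq]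
  omega
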